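-- pv_equiv track=rewrite | github.com/omri440/autovis | code_combiner.py | _extract_setup
-- ===== SOURCE A (Python) =====
-- from typing import List, Dict, Optional, Tuple
--
-- def _extract_setup(lines: List[str]) -> List[str]:
--     setup = []
--     skip_imports = True
--
--     for line in lines:
--         stripped = line.strip()
--
--         if stripped.startswith('const {') and 'require(' in stripped:
--             continue
--
--         if stripped or not skip_imports:
--             setup.append(line)
--             skip_imports = False
--
--     return setup
-- ===== SOURCE B (Python) =====
-- from typing import List
--
-- def _extract_setup(lines: List[str]) -> List[str]:
--     # Pass 1: drop every 'const { ... require(...)' line.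
--     filtered = [l for l in lines
--                 if not (l.strip().startswith('const {') and 'require(' in l.strip())]
--     # Pass 2: drop leading blank lines only.
--     while filtered and not filtered[0].strip():
--         filtered.pop(0)
--     return filtered
-- ===== Notes on version B (the rewrite author's own statement) =====
-- stated objective: simpler
-- what changed: Replaces the single flag-driven loop (skip_imports state machine) with two sequential passes: a comprehension filtering out require-lines, then dropping leading blank lines from the result.
import Mathlib
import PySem

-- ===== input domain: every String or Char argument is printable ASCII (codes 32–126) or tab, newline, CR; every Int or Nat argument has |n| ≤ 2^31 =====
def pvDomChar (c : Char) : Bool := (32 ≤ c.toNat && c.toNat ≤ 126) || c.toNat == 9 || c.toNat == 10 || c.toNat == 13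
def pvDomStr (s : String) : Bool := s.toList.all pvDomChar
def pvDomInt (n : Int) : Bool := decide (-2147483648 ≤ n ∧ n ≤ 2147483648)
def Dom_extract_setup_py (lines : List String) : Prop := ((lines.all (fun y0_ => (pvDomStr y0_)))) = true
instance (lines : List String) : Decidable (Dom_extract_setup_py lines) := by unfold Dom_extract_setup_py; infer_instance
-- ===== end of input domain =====

-- B replaces A's single flag-driven loop with two passes (filter require-lines, then drop leading blanks); simpler, same cost.


-- ===== PORT A =====
-- shared predicate: stripped.startswith('const {') and 'require(' in stripped
def pvReq (stripped : String) : Bool :=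
  PySem.Str.startswith stripped "const {" && PySem.Str.isIn "require(" stripped

def pvStepA (st : List String × Bool) (line : String) : List String × Bool :=
  let stripped := PySem.Str.strip line
  if pvReq stripped then st
  else if decide (stripped ≠ "") || !st.2 then (st.1 ++ [line], false)
  else st

def extract_setup_py (lines : List String) : List String :=
  (lines.foldl pvStepA ([], true)).1

-- ===== PORT B =====
-- the while-loop of Source B: pop leading blank lines
def pvDropLeadingBlanks : List String → List String
  | [] => []
  | l :: ls => if PySem.Str.strip l = "" then pvDropLeadingBlanks ls else l :: ls

def extract_setup_py_alt (lines : List String) : List String :=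
  pvDropLeadingBlanks (lines.filter (fun l => !pvReq (PySem.Str.strip l)))

-- ===== PRECONDITION & SPEC =====
def Spec_extract_setup_py (lines : List String) (out : List String) : Prop := out = extract_setup_py_alt lines
instance (lines : List String) (out : List String) : Decidable (Spec_extract_setup_py lines out) := by unfold Spec_extract_setup_py; infer_instance

-- ===== CLAIM (what is proved, stated in full; the proofs are below) =====
def Claim_equal_extract_setup_py : Prop := ∀ (lines : List String), Dom_extract_setup_py lines → Spec_extract_setup_py lines (extract_setup_py lines)

-- ===== LEMMAS AND PROOFS =====

-- once skip_imports is false, A appends exactly the non-require lines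
theorem foldA_skip_false (lines : List String) (acc : List String) :
    (lines.foldl pvStepA (acc, false)).1 = acc ++ lines.filter (fun l => !pvReq (PySem.Str.strip l)) := by
  induction lines generalizing acc with
  | nil => simp
  | cons l ls ih =>
    simp only [List.foldl_cons, List.filter_cons, pvStepA]
    by_cases h : pvReq (PySem.Str.strip l) = true
    · simp [h, ih]
    · simp only [Bool.not_eq_true] at h
      simp [h, ih]

-- with skip_imports true and empty accumulator, A computes B
theorem foldA_skip_true (lines : List String) :
    (lines.foldl pvStepA ([], true)).1
      = pvDropLeadingBlanks (lines.filter (fun l => !pvReq (PySem.Str.strip l))) := by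
  induction lines with
  | nil => simp [pvDropLeadingBlanks]
  | cons l ls ih =>
    simp only [List.foldl_cons, List.filter_cons, pvStepA]
    by_cases hreq : pvReq (PySem.Str.strip l) = true
    · simp [hreq, ih]
    · simp only [Bool.not_eq_true] at hreq
      by_cases hblank : PySem.Str.strip l = ""
      · have h0 : pvReq "" = false := by decide
        simp [hblank, h0, pvDropLeadingBlanks, ih]
      · simp [hreq, hblank, pvDropLeadingBlanks, foldA_skip_false]

-- ===== VERDICT (by name: the statement is the Claim_ definition above) =====
theorem extract_setup_py_spec : Claim_equal_extract_setup_py := by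
  intro lines _
  show extract_setup_py lines = extract_setup_py_alt lines
  simp [extract_setup_py, extract_setup_py_alt, foldA_skip_true]
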